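-- pv_equiv track=rewrite | github.com/Nikhilsuresh11/Enterprise-Strategy-Synthesis-Platform | app/services/slide_builder.py | _validate_mece
-- ===== SOURCE A (Python) =====
-- from typing import List, Dict, Any, Optional
--
-- def _validate_mece(items: List[str]) -> bool:
--     """
--     Validate MECE (Mutually Exclusive, Collectively Exhaustive) principle.
--     Ensures no overlap and complete coverage.
--     """
--     # Simple validation: check for duplicate concepts
--     seen_concepts = set()
--     for item in items:
--         key_words = set(item.lower().split())
--         if key_words & seen_concepts:
--             return False
--         seen_concepts.update(key_words)
--     return True
-- ===== SOURCE B (Python) =====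
-- def _validate_mece(items):
--     # Collect every item's deduped words into one flat list, then one cardinality check.
--     all_words = [w for item in items for w in dict.fromkeys(item.lower().split())]
--     return len(all_words) == len(set(all_words))
-- ===== Notes on version B (the rewrite author's own statement) =====
-- stated objective: simpler
-- what changed: Replaces the incremental seen-set loop with per-item intersection tests and an early return by flattening each item's deduped word list into one list and doing a single cardinality comparison len(all_words) == len(set(all_words)).
import Mathlib
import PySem

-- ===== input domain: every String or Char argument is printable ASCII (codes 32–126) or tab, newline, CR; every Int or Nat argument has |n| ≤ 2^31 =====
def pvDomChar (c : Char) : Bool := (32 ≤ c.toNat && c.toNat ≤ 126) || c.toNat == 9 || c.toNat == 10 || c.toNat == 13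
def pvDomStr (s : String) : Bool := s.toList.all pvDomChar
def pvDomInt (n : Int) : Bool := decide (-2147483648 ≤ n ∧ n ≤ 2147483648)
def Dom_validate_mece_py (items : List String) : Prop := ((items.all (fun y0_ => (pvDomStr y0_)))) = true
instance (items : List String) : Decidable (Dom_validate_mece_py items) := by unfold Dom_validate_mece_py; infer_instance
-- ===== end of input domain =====

-- B replaces A's incremental seen-set loop with early return by flattening the per-item
-- deduped word lists and doing a single cardinality comparison (simpler decomposition, same cost).

-- ===== PORT A =====
-- the 'for item in items' loop carrying 'seen_concepts', with the early 'return False'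
def validate_mece_py_go : List String → PySem.Set String → Bool
  | [], _ => true
  | item :: rest, seen =>
    let key_words : PySem.Set String := PySem.Set.ofList (PySem.Str.split₀ (PySem.Str.lower item))
    if PySem.Set.inter key_words seen ≠ [] then false   -- 'if key_words & seen_concepts:' (truthiness = nonempty)
    else validate_mece_py_go rest (PySem.Set.update seen key_words)

def validate_mece_py (items : List String) : Bool :=
  validate_mece_py_go items PySem.Set.empty

-- ===== PORT B =====
def validate_mece_py_alt (items : List String) : Bool :=
  let all_words := items.flatMap (fun item => PySem.List.dedup (PySem.Str.split₀ (PySem.Str.lower item)))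
  PySem.List.len all_words == PySem.List.len (PySem.Set.ofList all_words)

-- ===== PRECONDITION & SPEC =====
def Spec_validate_mece_py (items : List String) (out : Bool) : Prop := out = validate_mece_py_alt items
instance (items : List String) (out : Bool) : Decidable (Spec_validate_mece_py items out) := by unfold Spec_validate_mece_py; infer_instance

-- ===== CLAIM (what is proved, stated in full; the proofs are below) =====
def Claim_equal_validate_mece_py : Prop := ∀ (items : List String), Dom_validate_mece_py items → Spec_validate_mece_py items (validate_mece_py items)

-- ===== LEMMAS AND PROOFS =====

-- len(set(xs)) == len(xs) says exactly that xs has no duplicates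
lemma length_ofList_eq_iff_nodup {α : Type} [BEq α] [LawfulBEq α] (xs : List α) :
    (PySem.Set.ofList xs).length = xs.length ↔ xs.Nodup := by
  constructor
  · induction xs using List.reverseRecOn with
    | nil => simp
    | append_singleton xs x ih =>
      intro h
      have hof : PySem.Set.ofList (xs ++ [x]) = PySem.Set.add (PySem.Set.ofList xs) x := by
        simp [PySem.Set.ofList_eq_foldl, List.foldl_append]
      have hle := PySem.Set.length_ofList_le xs
      by_cases hx : x ∈ xs
      · exfalso
        have heq : PySem.Set.ofList (xs ++ [x]) = PySem.Set.ofList xs := by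
          rw [hof]
          simp [PySem.Set.add, PySem.Set.mem_ofList, hx]
        rw [heq] at h
        simp at h
        omega
      · have hlen : (PySem.Set.ofList (xs ++ [x])).length = (PySem.Set.ofList xs).length + 1 := by
          rw [hof]
          simp [PySem.Set.add, PySem.Set.mem_ofList, hx]
        rw [hlen] at h
        simp at h
        refine List.nodup_append.mpr ⟨ih (by omega), List.nodup_singleton x, ?_⟩
        intro a ha b hb
        simp only [List.mem_singleton] at hb
        subst hb
        exact fun he => hx (he ▸ ha)
  · intro h; rw [PySem.Set.ofList_eq_self_of_nodup xs h]

-- updating with a duplicate-free list disjoint from the set just appends it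
lemma update_append_of_disjoint {α : Type} [BEq α] [LawfulBEq α] (kw : List α) :
    ∀ seen : PySem.Set α, kw.Nodup → (∀ x ∈ kw, x ∉ seen) →
      PySem.Set.update seen kw = seen ++ kw := by
  induction kw with
  | nil => intro seen _ _; simp [PySem.Set.update]
  | cons a t ih =>
    intro seen hnd hdis
    have ha : a ∉ seen := hdis a (by simp)
    have hadd : PySem.Set.add seen a = seen ++ [a] := by
      simp [PySem.Set.add, ha]
    have hstep : PySem.Set.update seen (a :: t) = PySem.Set.update (seen ++ [a]) t := by
      simp [PySem.Set.update, hadd]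
    rw [hstep, ih (seen ++ [a]) hnd.of_cons]
    · simp
    · intro x hx
      simp only [List.mem_append, List.mem_singleton]
      rintro (h | rfl)
      · exact hdis x (by simp [hx]) h
      · exact (List.nodup_cons.mp hnd).1 hx

-- characterisation of A's loop: it succeeds iff seen together with all remaining word-sets is duplicate-free
lemma go_eq_true_iff (items : List String) :
    ∀ seen : PySem.Set String, seen.Nodup →
      (validate_mece_py_go items seen = true ↔
        (seen ++ items.flatMap (fun item => PySem.Set.ofList (PySem.Str.split₀ (PySem.Str.lower item)))).Nodup) := by
  induction items with
  | nil => intro seen hs; simpa [validate_mece_py_go] using hs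
  | cons item rest ih =>
    intro seen hs
    set kw : PySem.Set String := PySem.Set.ofList (PySem.Str.split₀ (PySem.Str.lower item)) with hkw
    have hkwnd : kw.Nodup := PySem.Set.nodup_ofList _
    by_cases hint : PySem.Set.inter kw seen ≠ []
    · -- some word of kw is already in seen: both sides are false
      obtain ⟨w, hw⟩ := List.exists_mem_of_ne_nil _ hint
      have hw1 : w ∈ List.filter (fun x => PySem.Set.contains seen x) kw := by
        simpa [PySem.Set.inter] using hw
      have hw2 := List.mem_filter.mp hw1
      have hwk : w ∈ kw := hw2.1
      have hws : w ∈ seen := (PySem.Set.contains_iff seen w).mp (by simpa using hw2.2)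
      have hL : validate_mece_py_go (item :: rest) seen = false := by
        simp only [validate_mece_py_go, ← hkw]
        rw [if_pos hint]
      have hR : ¬ (seen ++ (item :: rest).flatMap
          (fun item => PySem.Set.ofList (PySem.Str.split₀ (PySem.Str.lower item)))).Nodup := by
        intro h
        rw [List.flatMap_cons, ← List.append_assoc, List.nodup_append] at h
        exact (List.nodup_append.mp h.1).2.2 w hws w hwk rfl
      rw [hL]
      simp only [Bool.false_eq_true, false_iff]
      exact hR
    · -- disjoint step: unfold one iteration and use the IH on the grown seen-set
      rw [not_not] at hint
      have hdis : ∀ x ∈ kw, x ∉ seen := by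
        intro x hx hxs
        have hmem : x ∈ PySem.Set.inter kw seen := by
          simp [PySem.Set.inter, List.mem_filter, hx, hxs]
        simp [hint] at hmem
      have hupd : PySem.Set.update seen kw = seen ++ kw :=
        update_append_of_disjoint kw seen hkwnd hdis
      have hnd2 : (seen ++ kw).Nodup := by
        refine List.nodup_append.mpr ⟨hs, hkwnd, ?_⟩
        intro a ha b hb he
        exact hdis b hb (he ▸ ha)
      have hih := ih (PySem.Set.update seen kw) (by rw [hupd]; exact hnd2)
      rw [hupd] at hih
      simp only [validate_mece_py_go, ← hkw]
      rw [if_neg (by simp [hint]), hupd, hih, List.flatMap_cons, ← List.append_assoc]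

-- ===== VERDICT (by name: the statement is the Claim_ definition above) =====
theorem validate_mece_py_spec : Claim_equal_validate_mece_py := by
  intro items _
  unfold Spec_validate_mece_py
  have hB : validate_mece_py_alt items = true ↔
      (items.flatMap (fun item => PySem.Set.ofList (PySem.Str.split₀ (PySem.Str.lower item)))).Nodup := by
    unfold validate_mece_py_alt
    simp only [PySem.List.dedup_eq_ofList, PySem.List.len_eq, beq_iff_eq, Nat.cast_inj]
    rw [eq_comm, length_ofList_eq_iff_nodup]
  have hA : validate_mece_py items = true ↔
      (items.flatMap (fun item => PySem.Set.ofList (PySem.Str.split₀ (PySem.Str.lower item)))).Nodup := by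
    unfold validate_mece_py
    have hgo := go_eq_true_iff items PySem.Set.empty (by simp [PySem.Set.empty])
    simpa only [PySem.Set.empty, List.nil_append] using hgo
  rw [Bool.eq_iff_iff, hA, hB]
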